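-- pv_equiv track=rewrite | github.com/g0dux/AresProbe | aresprobe/core/token_sequencer.py | _has_dictionary_words
-- ===== SOURCE A (Python) =====
-- def _has_dictionary_words(token: str) -> bool:
--     """Check for dictionary words"""
--     common_words = [
--         'admin', 'user', 'test', 'demo', 'guest', 'root',
--         'password', 'login', 'welcome', 'hello', 'world',
--         'company', 'corp', 'inc', 'ltd', 'llc'
--     ]
--
--     token_lower = token.lower()
--
--     for word in common_words:
--         if word in token_lower:
--             return True
--
--     return False
-- ===== SOURCE B (Python) =====
-- WORDS = ('admin', 'user', 'test', 'demo', 'guest', 'root',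
--          'password', 'login', 'welcome', 'hello', 'world',
--          'company', 'corp', 'inc', 'ltd', 'llc')
--
-- def _has_dictionary_words(token: str) -> bool:
--     """Position-driven scan: walk the lowercased token once and at each
--     position test whether any dictionary word starts there."""
--     t = token.lower()
--     return any(t.startswith(w, i) for i in range(len(t) + 1) for w in WORDS)
-- ===== Notes on version B (the rewrite author's own statement) =====
-- stated objective: alternative
-- what changed: Replaces A's per-word substring loop (each word searched through the whole token) with a single left-to-right position scan that tests at each index whether some dictionary word starts there.
import Mathlib
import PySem

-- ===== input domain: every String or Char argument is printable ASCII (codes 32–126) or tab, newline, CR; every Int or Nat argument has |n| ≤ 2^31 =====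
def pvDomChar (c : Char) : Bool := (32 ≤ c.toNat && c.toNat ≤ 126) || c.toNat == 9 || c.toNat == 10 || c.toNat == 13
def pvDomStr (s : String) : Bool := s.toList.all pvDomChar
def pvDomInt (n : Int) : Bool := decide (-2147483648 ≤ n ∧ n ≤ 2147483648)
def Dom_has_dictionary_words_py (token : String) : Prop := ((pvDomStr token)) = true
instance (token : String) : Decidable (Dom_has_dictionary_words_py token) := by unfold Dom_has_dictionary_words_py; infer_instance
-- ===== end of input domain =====

-- B replaces A's per-word whole-token substring loop with one left-to-right position
-- scan testing which word starts at each index (objective: alternative traversal).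

-- ===== PORT A =====
-- A's word list
def pvCommonWords : List String :=
  ["admin", "user", "test", "demo", "guest", "root",
   "password", "login", "welcome", "hello", "world",
   "company", "corp", "inc", "ltd", "llc"]

-- A's loop: for word in common_words: if word in token_lower: return True; return False
def pvScanWords : List String → String → Bool
  | [], _ => false
  | w :: ws, t => if PySem.Str.isIn w t then true else pvScanWords ws t

def has_dictionary_words_py (token : String) : Bool :=
  pvScanWords pvCommonWords (PySem.Str.lower token)

-- ===== PORT B =====
-- Source B's generator: any(t.startswith(w, i) for i in range(len(t)+1) for w in WORDS);
-- t.startswith(w, i) with 0 ≤ i ≤ len(t) is exactly a prefix test on (t.toList.drop i).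
def has_dictionary_words_py_alt (token : String) : Bool :=
  let t := (PySem.Str.lower token).toList
  (List.range (t.length + 1)).any (fun i =>
    pvCommonWords.any (fun w => w.toList.isPrefixOf (t.drop i)))

-- ===== PRECONDITION & SPEC =====
def Spec_has_dictionary_words_py (token : String) (out : Bool) : Prop := out = has_dictionary_words_py_alt token
instance (token : String) (out : Bool) : Decidable (Spec_has_dictionary_words_py token out) := by unfold Spec_has_dictionary_words_py; infer_instance

-- ===== CLAIM (what is proved, stated in full; the proofs are below) =====
def Claim_equal_has_dictionary_words_py : Prop := ∀ (token : String), Dom_has_dictionary_words_py token → Spec_has_dictionary_words_py token (has_dictionary_words_py token)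

-- ===== LEMMAS AND PROOFS =====

-- A's early-return loop is the boolean "any" over the word list.
theorem pvScanWords_eq_any (ws : List String) (t : String) :
    pvScanWords ws t = ws.any (fun w => PySem.Str.isIn w t) := by
  induction ws with
  | nil => rfl
  | cons w ws ih =>
      simp only [pvScanWords, List.any_cons, ih]
      split_ifs with h <;> simp_all [PySem.Str.isIn_eq]

-- substring containment ↔ some position ≤ length where the word is a prefix of the tail
theorem pvIsIn_iff_pos (w t : String) :
    PySem.Str.isIn w t = true ↔
      ∃ i < t.toList.length + 1, w.toList.isPrefixOf (t.toList.drop i) = true := by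
  rw [PySem.Str.isIn_iff_infix]
  constructor
  · intro h
    rcases PySem.Chars.exists_prefix_drop_iff_isIn w.toList t.toList |>.2
        (PySem.Chars.isIn_iff_infix _ _ |>.2 h) with ⟨j, hj⟩
    by_cases hle : j ≤ t.toList.length
    · exact ⟨j, by omega, List.isPrefixOf_iff_prefix.2 hj⟩
    · have hnil : t.toList.drop j = [] := List.drop_eq_nil_of_le (by omega)
      have hw : w.toList = [] := List.prefix_nil.1 (hnil ▸ hj)
      exact ⟨t.toList.length, by omega,
        List.isPrefixOf_iff_prefix.2 (by simp [hw])⟩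
  · rintro ⟨i, _, hp⟩
    exact (List.isPrefixOf_iff_prefix.1 hp).isInfix.trans (List.drop_subset i t.toList |> fun _ => (t.toList.drop_suffix i).isInfix)

-- ===== VERDICT (by name: the statement is the Claim_ definition above) =====
theorem has_dictionary_words_py_spec : Claim_equal_has_dictionary_words_py := by
  intro token _
  unfold Spec_has_dictionary_words_py has_dictionary_words_py has_dictionary_words_py_alt
  rw [pvScanWords_eq_any]
  rw [Bool.eq_iff_iff]
  simp only [List.any_eq_true, List.mem_range]
  constructor <;> intro h
  · rcases h with ⟨w, hw, hin⟩
    rcases (pvIsIn_iff_pos w _).1 hin with ⟨i, hi, hp⟩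
    exact ⟨i, hi, w, hw, hp⟩
  · rcases h with ⟨i, hi, w, hw, hp⟩
    exact ⟨w, hw, (pvIsIn_iff_pos w _).2 ⟨i, hi, hp⟩⟩
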